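-- pv_equiv track=rewrite | github.com/mariustache/aoc | aoc-2020/day10_adapter_array/main.py | number_of_subsets
-- ===== SOURCE A (Python) =====
-- def is_consecutive(list_):
--     if not list_[1] - list_[0] == 1:
--         return False
--     if list_[2] - list_[1] == 1:
--         return True
--
--     return False
--
-- def number_of_subsets(adapters):
--     # Compute the number of subsets that contain 3 adapters with
--     # a difference of 1.
--     end = 3
--     idx = 0
--     total_number = 0
--     subset = adapters[idx:end]
--     while idx < len(adapters) and end <= len(adapters):
--         if is_consecutive(subset):
--             idx = end
--             end += 3
--             total_number += 1
--         else:
--             idx += 1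
--             end += 1
--
--         subset = adapters[idx:end]
--
--     return total_number
-- ===== SOURCE B (Python) =====
-- def number_of_subsets(adapters):
--     # Run-length accounting: each maximal run of consecutive elements
--     # (adjacent difference exactly 1) of k elements contributes k // 3.
--     total = 0
--     run = 1
--     for prev, cur in zip(adapters, adapters[1:]):
--         if cur - prev == 1:
--             run += 1
--         else:
--             total += run // 3
--             run = 1
--     return total + run // 3
-- ===== Notes on version B (the rewrite author's own statement) =====
-- stated objective: alternative
-- what changed: Replaced the greedy sliding-window scan (3-element slices, jump-by-3 on a hit, shift-by-1 otherwise) with a single pass of run-length accounting that sums run_length // 3 over maximal runs of difference-1 adjacent elements.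
import Mathlib
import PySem

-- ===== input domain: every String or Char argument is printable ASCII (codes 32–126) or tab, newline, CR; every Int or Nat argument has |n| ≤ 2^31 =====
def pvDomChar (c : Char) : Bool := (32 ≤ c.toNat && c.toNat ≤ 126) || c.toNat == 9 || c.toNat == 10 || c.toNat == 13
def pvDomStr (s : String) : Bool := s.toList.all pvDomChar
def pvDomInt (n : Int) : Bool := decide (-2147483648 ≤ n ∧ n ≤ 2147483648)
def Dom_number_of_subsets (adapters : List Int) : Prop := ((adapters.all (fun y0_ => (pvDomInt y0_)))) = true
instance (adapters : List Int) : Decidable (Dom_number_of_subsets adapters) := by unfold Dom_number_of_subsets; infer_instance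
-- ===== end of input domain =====

-- B replaces A's greedy sliding-window / jump-by-3 scan with one pass of run-length
-- accounting (sum of run_length // 3 over maximal runs of difference-1 elements).

-- ===== PORT A =====
-- list_[k] is only ever reached on 3-element slices inside A; getD 0 stands in for the
-- (there unreachable) IndexError value.
def is_consecutive (list_ : List Int) : Bool :=
  if ¬ ((PySem.List.pyGet? list_ 1).getD 0 - (PySem.List.pyGet? list_ 0).getD 0 = 1) then
    false
  else if (PySem.List.pyGet? list_ 2).getD 0 - (PySem.List.pyGet? list_ 1).getD 0 = 1 then
    true
  else
    false

-- the while loop; fuel only makes the recursion total (idx grows by at least 1 per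
-- step, so adapters.length fuel is never exhausted before the guard fails)
def nos_loop (adapters : List Int) : Nat → Int → Int → Int → Int
  | 0, _, _, total => total
  | fuel + 1, idx, endv, total =>
    if idx < (adapters.length : Int) ∧ endv ≤ (adapters.length : Int) then
      if is_consecutive (PySem.List.slice adapters (some idx) (some endv)) then
        nos_loop adapters fuel endv (endv + 3) (total + 1)
      else
        nos_loop adapters fuel (idx + 1) (endv + 1) total
    else total

def number_of_subsets (adapters : List Int) : Int :=
  nos_loop adapters adapters.length 0 3 0

-- ===== PORT B =====
def number_of_subsets_alt (adapters : List Int) : Int :=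
  let step : Int × Int → Int × Int → Int × Int := fun s p =>
    if p.2 - p.1 = 1 then (s.1, s.2 + 1) else (s.1 + PySem.Int.floordiv s.2 3, 1)
  let tr := (adapters.zip (adapters.drop 1)).foldl step (0, 1)
  tr.1 + PySem.Int.floordiv tr.2 3

-- ===== PRECONDITION & SPEC =====
def Spec_number_of_subsets (adapters : List Int) (out : Int) : Prop := out = number_of_subsets_alt adapters
instance (adapters : List Int) (out : Int) : Decidable (Spec_number_of_subsets adapters out) := by unfold Spec_number_of_subsets; infer_instance

-- ===== CLAIM (what is proved, stated in full; the proofs are below) =====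
def Claim_equal_number_of_subsets : Prop := ∀ (adapters : List Int), Dom_number_of_subsets adapters → Spec_number_of_subsets adapters (number_of_subsets adapters)

-- ===== LEMMAS AND PROOFS =====

-- common reference: A's greedy scan read structurally off the list
def gref : List Int → Int
  | [] => 0
  | [_] => 0
  | [_, _] => 0
  | a :: b :: c :: rest =>
    if b - a = 1 ∧ c - b = 1 then 1 + gref rest else gref (b :: c :: rest)
termination_by l => l.length

theorem gref_nil : gref [] = 0 := by simp only [gref]
theorem gref_one (a : Int) : gref [a] = 0 := by simp only [gref]
theorem gref_two (a b : Int) : gref [a, b] = 0 := by simp only [gref]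
theorem gref_cons3 (a b c : Int) (rest : List Int) :
    gref (a :: b :: c :: rest) =
      if b - a = 1 ∧ c - b = 1 then 1 + gref rest else gref (b :: c :: rest) := by
  simp only [gref]

theorem gref_break (a b : Int) (l : List Int) (h : ¬ b - a = 1) :
    gref (a :: b :: l) = gref (b :: l) := by
  cases l with
  | nil => rw [gref_two, gref_one]
  | cons c rest => rw [gref_cons3, if_neg (fun hc => h hc.1)]

-- recursive reading of B's fold
def loopB : Int → List Int → Int → Int → Int
  | _, [], t, r => t + PySem.Int.floordiv r 3
  | prev, x :: xs, t, r =>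
    if x - prev = 1 then loopB x xs t (r + 1) else loopB x xs (t + PySem.Int.floordiv r 3) 1

theorem loopB_nil (prev t r : Int) : loopB prev [] t r = t + PySem.Int.floordiv r 3 := rfl
theorem loopB_cons (prev x : Int) (xs : List Int) (t r : Int) :
    loopB prev (x :: xs) t r =
      if x - prev = 1 then loopB x xs t (r + 1)
      else loopB x xs (t + PySem.Int.floordiv r 3) 1 := rfl

theorem foldl_eq_loopB (l : List Int) : ∀ (prev t r : Int),
    (((prev :: l).zip l).foldl (fun (s p : Int × Int) =>
        if p.2 - p.1 = 1 then (s.1, s.2 + 1) else (s.1 + PySem.Int.floordiv s.2 3, 1)) (t, r)).1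
      + PySem.Int.floordiv ((((prev :: l).zip l).foldl (fun (s p : Int × Int) =>
        if p.2 - p.1 = 1 then (s.1, s.2 + 1) else (s.1 + PySem.Int.floordiv s.2 3, 1)) (t, r)).2) 3
      = loopB prev l t r := by
  induction l with
  | nil => intro prev t r; rfl
  | cons x xs ih =>
    intro prev t r
    rw [List.zip_cons_cons, List.foldl_cons, loopB_cons]
    by_cases h : x - prev = 1
    · rw [if_pos h, if_pos (show (prev, x).2 - (prev, x).1 = 1 from h)]
      exact ih x t (r + 1)
    · rw [if_neg h, if_neg (show ¬ (prev, x).2 - (prev, x).1 = 1 from h)]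
      exact ih x (t + PySem.Int.floordiv r 3) 1

theorem loopB_shift (l : List Int) : ∀ (prev t r : Int),
    loopB prev l t r = t + loopB prev l 0 r := by
  induction l with
  | nil => intro prev t r; rw [loopB_nil, loopB_nil]; ring
  | cons x xs ih =>
    intro prev t r
    rw [loopB_cons, loopB_cons]
    by_cases h : x - prev = 1
    · rw [if_pos h, if_pos h, ih x t (r + 1)]
    · rw [if_neg h, if_neg h, ih x (t + PySem.Int.floordiv r 3) 1,
          ih x (0 + PySem.Int.floordiv r 3) 1]; ring

theorem floordiv_add_three (r : Int) :
    PySem.Int.floordiv (r + 3) 3 = PySem.Int.floordiv r 3 + 1 := by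
  rw [PySem.Int.floordiv_eq_ediv_of_pos (by norm_num),
      PySem.Int.floordiv_eq_ediv_of_pos (by norm_num)]
  omega

theorem loopB_credit (l : List Int) : ∀ (prev r : Int),
    loopB prev l 0 (r + 3) = 1 + loopB prev l 0 r := by
  induction l with
  | nil => intro prev r; rw [loopB_nil, loopB_nil, floordiv_add_three]; ring
  | cons x xs ih =>
    intro prev r
    rw [loopB_cons, loopB_cons]
    by_cases h : x - prev = 1
    · rw [if_pos h, if_pos h, show r + 3 + 1 = (r + 1) + 3 by ring, ih x (r + 1)]
    · rw [if_neg h, if_neg h, loopB_shift xs x (0 + PySem.Int.floordiv (r + 3) 3) 1,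
          loopB_shift xs x (0 + PySem.Int.floordiv r 3) 1, floordiv_add_three]
      ring

-- main bridge: B's loop with fresh run credit computes the greedy scan
theorem loopB_eq_gref (n : Nat) : ∀ (l : List Int), l.length ≤ n →
    (∀ a : Int, loopB a l 0 1 = gref (a :: l)) ∧ (∀ c : Int, loopB c l 0 0 = gref l) := by
  induction n with
  | zero =>
    intro l hl
    cases l with
    | nil =>
      refine ⟨fun a => ?_, fun c => ?_⟩
      · rw [loopB_nil, gref_one]; decide
      · rw [loopB_nil, gref_nil]; decide
    | cons b l2 => simp at hl
  | succ n ih =>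
    intro l hl
    constructor
    · intro a
      cases l with
      | nil => rw [loopB_nil, gref_one]; decide
      | cons b l2 =>
        cases l2 with
        | nil =>
          rw [loopB_cons]
          by_cases h : b - a = 1
          · rw [if_pos h, loopB_nil, gref_two]; decide
          · rw [if_neg h, loopB_nil, gref_two]; decide
        | cons c rest =>
          rw [loopB_cons]
          by_cases h1 : b - a = 1
          · rw [if_pos h1, loopB_cons]
            by_cases h2 : c - b = 1
            · rw [if_pos h2, show (1 : Int) + 1 + 1 = 0 + 3 by norm_num,
                  loopB_credit rest c 0,
                  (ih rest (by simp only [List.length_cons] at hl; omega)).2 c,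
                  gref_cons3, if_pos ⟨h1, h2⟩]
            · rw [if_neg h2, show (0 : Int) + PySem.Int.floordiv (1 + 1) 3 = 0 by decide,
                  (ih rest (by simp only [List.length_cons] at hl; omega)).1 c,
                  gref_cons3, if_neg (fun hc => h2 hc.2), gref_break b c rest h2]
          · rw [if_neg h1, show (0 : Int) + PySem.Int.floordiv 1 3 = 0 by decide,
                (ih (c :: rest) (by simp only [List.length_cons] at hl ⊢; omega)).1 b,
                gref_cons3, if_neg (fun hc => h1 hc.1)]
    · intro c
      cases l with
      | nil => rw [loopB_nil, gref_nil]; decide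
      | cons d rest =>
        have hd1 : loopB d rest 0 1 = gref (d :: rest) :=
          (ih rest (by simp only [List.length_cons] at hl; omega)).1 d
        rw [loopB_cons]
        by_cases h : d - c = 1
        · rw [if_pos h, show (0 : Int) + 1 = 1 by norm_num, hd1]
        · rw [if_neg h, show (0 : Int) + PySem.Int.floordiv 0 3 = 0 by decide, hd1]

theorem alt_eq_gref (l : List Int) : number_of_subsets_alt l = gref l := by
  cases l with
  | nil =>
    show (0 : Int) + PySem.Int.floordiv 1 3 = gref []
    rw [gref_nil]; decide
  | cons a rest =>
    have hdef : number_of_subsets_alt (a :: rest) =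
        (((a :: rest).zip rest).foldl (fun (s p : Int × Int) =>
          if p.2 - p.1 = 1 then (s.1, s.2 + 1) else (s.1 + PySem.Int.floordiv s.2 3, 1)) (0, 1)).1
        + PySem.Int.floordiv ((((a :: rest).zip rest).foldl (fun (s p : Int × Int) =>
          if p.2 - p.1 = 1 then (s.1, s.2 + 1) else (s.1 + PySem.Int.floordiv s.2 3, 1)) (0, 1)).2) 3 := rfl
    rw [hdef, foldl_eq_loopB rest a 0 1, (loopB_eq_gref rest.length rest le_rfl).1 a]

-- A's loop, at the states it reaches (endv = idx + 3), is the greedy scan on the tail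
theorem nos_loop_eq_gref (fuel : Nat) : ∀ (l : List Int) (idx total : Int),
    0 ≤ idx → (l.length : Int) - idx ≤ fuel →
    nos_loop l fuel idx (idx + 3) total = total + gref (l.drop idx.toNat) := by
  induction fuel with
  | zero =>
    intro l idx total h0 hf
    have hdrop : l.drop idx.toNat = [] := List.drop_eq_nil_of_le (by omega)
    simp only [nos_loop]
    rw [hdrop, gref_nil]
    ring
  | succ fuel ih =>
    intro l idx total h0 hf
    simp only [nos_loop]
    by_cases hc : idx < (l.length : Int) ∧ idx + 3 ≤ (l.length : Int)
    · rw [if_pos hc]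
      have hsl := PySem.List.slice_toNat (xs := l) (a := idx) (b := idx + 3) (by omega) (by omega)
      rw [show (idx + 3).toNat - idx.toNat = 3 by omega] at hsl
      obtain ⟨a, b, c, rest, hd⟩ : ∃ a b c rest, l.drop idx.toNat = a :: b :: c :: rest := by
        have hlen : 3 ≤ (l.drop idx.toNat).length := by rw [List.length_drop]; omega
        match h : l.drop idx.toNat with
        | a :: b :: c :: rest => exact ⟨a, b, c, rest, rfl⟩
        | [] => rw [h] at hlen; simp at hlen
        | [x] => rw [h] at hlen; simp at hlen
        | [x, y] => rw [h] at hlen; simp at hlen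
      have hcons : is_consecutive ((l.drop idx.toNat).take 3) = decide (b - a = 1 ∧ c - b = 1) := by
        rw [hd]
        by_cases h1 : b - a = 1 <;> by_cases h2 : c - b = 1 <;>
          simp [is_consecutive, PySem.List.pyGet?, PySem.List.pyIdx?, List.take, h1, h2]
      rw [hsl, hcons]
      have h6 : l.drop (idx + 3).toNat = rest := by
        rw [show (idx + 3).toNat = idx.toNat + 3 by omega, ← List.drop_drop, hd]
        rfl
      have h7 : l.drop (idx + 1).toNat = b :: c :: rest := by
        rw [show (idx + 1).toNat = idx.toNat + 1 by omega, ← List.drop_drop, hd]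
        rfl
      by_cases hiff : b - a = 1 ∧ c - b = 1
      · rw [if_pos (decide_eq_true hiff),
            ih l (idx + 3) (total + 1) (by omega) (by omega), h6, hd, gref_cons3, if_pos hiff]
        ring
      · rw [if_neg (by simp only [decide_eq_true_eq]; exact hiff),
            show idx + 3 + 1 = idx + 1 + 3 by ring,
            ih l (idx + 1) total (by omega) (by omega), h7, hd, gref_cons3, if_neg hiff]
    · rw [if_neg hc]
      have hz : gref (l.drop idx.toNat) = 0 := by
        match h2 : l.drop idx.toNat with
        | [] => rw [gref_nil]
        | [x] => rw [gref_one]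
        | [x, y] => rw [gref_two]
        | x :: y :: z :: r =>
          exfalso
          have hlen : l.length - idx.toNat = r.length + 3 := by
            have := congrArg List.length h2
            simpa [List.length_drop] using this
          rcases not_and_or.mp hc with h | h <;> omega
      rw [hz]
      ring

-- ===== VERDICT (by name: the statement is the Claim_ definition above) =====
theorem number_of_subsets_spec : Claim_equal_number_of_subsets := by
  intro adapters _
  unfold Spec_number_of_subsets
  rw [alt_eq_gref]
  unfold number_of_subsets
  have h := nos_loop_eq_gref adapters.length adapters 0 0 le_rfl (by omega)
  rw [show (0 : Int) + 3 = 3 by norm_num] at h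
  rw [h]
  simp
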